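-- pv_equiv track=rewrite | github.com/AndrewShepherd/leetcode-python | palindrome-pairs/palindrome_pairs.py | getSufixAfterPalindromes
-- ===== SOURCE A (Python) =====
-- def isPalindrome(compressedWord, start, endExclusive):
--     l = start
--     r = endExclusive - 1
--     while l < r:
--         if compressedWord[l] != compressedWord[r]:
--             return False
--         l += 1
--         r -= 1
--     return True
--
-- def getSufixAfterPalindromes(compressedWord):
--     for index, pivotWord in reversed(list(enumerate(compressedWord))):
--         char, count = pivotWord
--         lastChar, lastCount = compressedWord[0]
--         if char != lastChar or count < lastCount:
--             continue
--         if index == 0: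
--             yield compressedWord[1:]
--             for c in range(1, count):
--                 yield ((char, c),) + compressedWord[1:]
--         else:
--             if isPalindrome(compressedWord, 1, index):
--                 if count == lastCount:
--                     yield compressedWord[index+1:]
--                 else:
--                     yield ((char, count-lastCount),) + compressedWord[index+1:]
-- ===== SOURCE B (Python) =====
-- def getSufixAfterPalindromes(compressedWord):
--     # Different algorithm: a KMP failure function over mid + sentinel + reversed(mid)
--     # precomputes ALL palindromic-prefix lengths of mid = compressedWord[1:] at once
--     # (a border of length k <= len(mid) of that string <=> mid[:k] == mid[:k][::-1]);
--     # the pivot scan then tests set membership instead of re-checking palindromes.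
--     if not compressedWord:
--         return
--     char0, count0 = compressedWord[0]
--     mid = list(compressedWord[1:])
--     sep = object()                      # matches nothing but itself
--     u = mid + [sep] + mid[::-1]
--     f = [0] * (len(u) + 1)              # f[i] = longest proper border of u[:i]
--     k = 0
--     for i in range(1, len(u)):
--         while k > 0 and u[i] != u[k]:
--             k = f[k]
--         if u[i] == u[k]:
--             k += 1
--         f[i + 1] = k
--     pal = set()                         # nonzero palindromic-prefix lengths of mid
--     k = f[len(u)]
--     while k > 0:
--         pal.add(k)
--         k = f[k]
--     for index in range(len(compressedWord) - 1, 0, -1):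
--         char, count = compressedWord[index]
--         if char == char0 and count >= count0 and (index == 1 or (index - 1) in pal):
--             tail = compressedWord[index + 1:]
--             if count == count0:
--                 yield tail
--             else:
--                 yield ((char, count - count0),) + tail
--     yield compressedWord[1:]
--     for c in range(1, count0):
--         yield ((char0, c),) + compressedWord[1:]
-- ===== Notes on version B (the rewrite author's own statement) =====
-- stated objective: alternative
-- what changed: B precomputes every palindromic-prefix length of compressedWord[1:] at once with a KMP failure function over mid + sentinel + reversed(mid) (prefix-palindromes = borders of that string) and the pivot scan then uses set lookups, replacing A's per-pivot two-pointer palindrome checks.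
import Mathlib
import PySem

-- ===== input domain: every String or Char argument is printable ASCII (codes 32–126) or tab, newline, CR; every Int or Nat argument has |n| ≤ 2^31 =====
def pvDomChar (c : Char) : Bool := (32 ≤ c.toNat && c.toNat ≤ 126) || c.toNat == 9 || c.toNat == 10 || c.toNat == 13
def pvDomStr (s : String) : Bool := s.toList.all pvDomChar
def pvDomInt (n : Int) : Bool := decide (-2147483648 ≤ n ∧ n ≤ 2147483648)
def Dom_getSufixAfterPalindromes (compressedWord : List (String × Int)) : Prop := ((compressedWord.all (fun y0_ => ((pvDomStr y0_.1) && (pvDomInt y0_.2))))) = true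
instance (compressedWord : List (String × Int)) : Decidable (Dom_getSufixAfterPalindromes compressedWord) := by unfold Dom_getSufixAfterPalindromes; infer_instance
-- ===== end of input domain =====

-- B replaces A's per-pivot palindrome scans with a KMP failure function over
-- mid + sentinel + reversed(mid) that precomputes all palindromic-prefix lengths once.
-- ===== PORT A =====
-- while-loop of isPalindrome as structural recursion on the gap r - l
def isPalindromeLoop (compressedWord : List (String × Int)) (l r : Int) : Bool :=
  if l < r then
    if PySem.List.pyGet? compressedWord l ≠ PySem.List.pyGet? compressedWord r then false
    else isPalindromeLoop compressedWord (l + 1) (r - 1)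
  else true
termination_by (r - l).toNat
decreasing_by omega

def isPalindrome (compressedWord : List (String × Int)) (start endExclusive : Int) : Bool :=
  isPalindromeLoop compressedWord start (endExclusive - 1)

def getSufixAfterPalindromes (compressedWord : List (String × Int)) : List (List (String × Int)) :=
  (PySem.List.enumerate compressedWord 0).reverse.foldl (fun acc p =>
    let index := p.1
    let char := p.2.1
    let count := p.2.2
    match PySem.List.pyGet? compressedWord 0 with
    | none => acc  -- unreachable guard: the loop body only runs when compressedWord ≠ []
    | some (lastChar, lastCount) =>
      if char ≠ lastChar ∨ count < lastCount then acc
      else if index = 0 then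
        (PySem.List.pyRange 1 count 1).foldl
          (fun acc2 c => acc2 ++ [(char, c) :: PySem.List.slice compressedWord (some 1) none])
          (acc ++ [PySem.List.slice compressedWord (some 1) none])
      else
        if isPalindrome compressedWord 1 index then
          if count = lastCount then
            acc ++ [PySem.List.slice compressedWord (some (index + 1)) none]
          else
            acc ++ [(char, count - lastCount) :: PySem.List.slice compressedWord (some (index + 1)) none]
        else acc) []

-- ===== PORT B =====
-- the Python sentinel `sep = object()` (equal only to itself) is ported as `none`,
-- word entries as `some _`
-- inner `while k > 0 and u[i] != u[k]: k = f[k]`; the fuel only makes the loop total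
-- (f[k] < k throughout, proved below), each step consumes one unit
def kmpWhile (u : List (Option (String × Int))) (f : List Int) (i : Int) : Int → Nat → Int
  | k, 0 => k
  | k, fuel+1 =>
    if 0 < k ∧ PySem.List.pyGet? u i ≠ PySem.List.pyGet? u k
    then kmpWhile u f i (f.getD k.toNat 0) fuel
    else k

-- `for i in range(1, len(u)): … ; f[i+1] = k` building the failure table f
def kmpFold (u : List (Option (String × Int))) : List Int × Int :=
  (PySem.List.pyRange 1 (u.length : Int) 1).foldl
    (fun st i =>
      let k := kmpWhile u st.1 i st.2 st.2.toNat
      let k := if PySem.List.pyGet? u i = PySem.List.pyGet? u k then k + 1 else k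
      (st.1.set (i + 1).toNat k, k))
    (List.replicate (u.length + 1) 0, 0)

-- `k = f[len(u)]; while k > 0: pal.add(k); k = f[k]` (fuel n+1 suffices: k decreases)
def palChain (f : List Int) : Int → Nat → PySem.Set Int → PySem.Set Int
  | _, 0, s => s
  | k, fuel+1, s => if 0 < k then palChain f (f.getD k.toNat 0) fuel (PySem.Set.add s k) else s

def getSufixAfterPalindromes_alt (compressedWord : List (String × Int)) : List (List (String × Int)) :=
  match compressedWord with
  | [] => []
  | (char0, count0) :: _ =>
    let mid := PySem.List.slice compressedWord (some 1) none
    -- u = mid + [sep] + mid[::-1]  (mid[::-1] = mid.reverse, PySem.List.slice?_none_none_neg_one)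
    let u : List (Option (String × Int)) := mid.map some ++ [none] ++ mid.reverse.map some
    let f := (kmpFold u).1
    let pal := palChain f (f.getD u.length 0) (u.length + 1) PySem.Set.empty
    (PySem.List.pyRange ((compressedWord.length : Int) - 1) 0 (-1)).foldl
      (fun acc index =>
        match PySem.List.pyGet? compressedWord index with
        | none => acc  -- unreachable guard: 1 <= index < len
        | some (char, count) =>
          if char = char0 ∧ count0 ≤ count ∧ (index = 1 ∨ (index - 1) ∈ pal) then
            let tail := PySem.List.slice compressedWord (some (index + 1)) none
            if count = count0 then acc ++ [tail]
            else acc ++ [(char, count - count0) :: tail]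
          else acc)
      []
    ++ [PySem.List.slice compressedWord (some 1) none]
    ++ (PySem.List.pyRange 1 count0 1).map
        (fun c => (char0, c) :: PySem.List.slice compressedWord (some 1) none)

-- ===== PRECONDITION & SPEC =====
def Spec_getSufixAfterPalindromes (compressedWord : List (String × Int)) (out : List (List (String × Int))) : Prop := out = getSufixAfterPalindromes_alt compressedWord
instance (compressedWord : List (String × Int)) (out : List (List (String × Int))) : Decidable (Spec_getSufixAfterPalindromes compressedWord out) := by unfold Spec_getSufixAfterPalindromes; infer_instance

-- ===== CLAIM (what is proved, stated in full; the proofs are below) =====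
def Claim_equal_getSufixAfterPalindromes : Prop := ∀ (compressedWord : List (String × Int)), Dom_getSufixAfterPalindromes compressedWord → Spec_getSufixAfterPalindromes compressedWord (getSufixAfterPalindromes compressedWord)

-- ===== LEMMAS AND PROOFS =====

def bordB {α : Type} (s : List α) (k : Nat) : Prop :=
  k ≤ s.length ∧ s.take k = s.drop (s.length - k)
def pb {α : Type} [DecidableEq α] (s : List α) : Nat :=
  Nat.findGreatest (fun k => s.take k = s.drop (s.length - k)) (s.length - 1)
theorem bordB_zero {α : Type} (s : List α) : bordB s 0 := by
  constructor
  · omega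
  · simp

theorem pb_bord {α : Type} [DecidableEq α] (s : List α) : bordB s (pb s) := by
  by_cases h : pb s = 0
  · rw [h]; exact bordB_zero s
  · have he := (Nat.findGreatest_eq_iff (P := fun k => s.take k = s.drop (s.length - k))
      (m := pb s) (k := s.length - 1)).mp rfl
    have hle : pb s ≤ s.length - 1 := Nat.findGreatest_le _
    exact ⟨by omega, he.2.1 h⟩

theorem pb_ge {α : Type} [DecidableEq α] (s : List α) (j : Nat)
    (hj : bordB s j) (hlt : j < s.length) : j ≤ pb s := by
  by_cases h : j = 0
  · omega
  · exact Nat.le_findGreatest (by omega) hj.2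

theorem bord_down {α : Type} (s : List α) (k j : Nat)
    (hk : bordB s k) (hj : bordB s j) (hjk : j ≤ k) : bordB (s.take k) j := by
  obtain ⟨hk1, hk2⟩ := hk
  obtain ⟨hj1, hj2⟩ := hj
  constructor
  · simp [List.length_take]; omega
  · rw [List.take_take, min_eq_left hjk, List.length_take, min_eq_left hk1, hk2,
      List.drop_drop, hj2]
    congr 1
    omega

theorem bord_up {α : Type} (s : List α) (k j : Nat)
    (hk : bordB s k) (hj : bordB (s.take k) j) : bordB s j := by
  obtain ⟨hk1, hk2⟩ := hk
  obtain ⟨hj1, hj2⟩ := hj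
  rw [List.length_take, min_eq_left hk1] at hj1
  rw [List.take_take, min_eq_left hj1, List.length_take, min_eq_left hk1, hk2,
      List.drop_drop] at hj2
  constructor
  · omega
  · rw [hj2]
    congr 1
    omega

theorem bord_snoc {α : Type} (s : List α) (a : α) (k : Nat) (hk : k < s.length) :
    bordB (s ++ [a]) (k + 1) ↔ bordB s k ∧ s[k]? = some a := by
  have hlen : (s ++ [a]).length = s.length + 1 := by simp
  have ht : (s ++ [a]).take (k+1) = s.take k ++ [s[k]] := by
    rw [List.take_append_of_le_length (by omega), ← List.take_concat_get' _ _ hk]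
  have hd : (s ++ [a]).drop ((s ++ [a]).length - (k+1)) = s.drop (s.length - k) ++ [a] := by
    rw [hlen]
    have : s.length + 1 - (k + 1) = s.length - k := by omega
    rw [this, List.drop_append_of_le_length (by omega)]
  constructor
  · rintro ⟨h1, h2⟩
    rw [ht, hd] at h2
    have := List.append_inj h2 (by simp [List.length_take, List.length_drop]; omega)
    refine ⟨⟨by omega, this.1⟩, ?_⟩
    rw [List.getElem?_eq_getElem hk]
    simpa using this.2
  · rintro ⟨⟨h1, h2⟩, h3⟩
    refine ⟨by omega, ?_⟩
    rw [ht, hd, h2]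
    rw [List.getElem?_eq_getElem hk] at h3
    simp at h3
    rw [h3]

theorem pb_lt {α : Type} [DecidableEq α] (s : List α) (h : s ≠ []) : pb s < s.length := by
  have h1 := Nat.findGreatest_le (P := fun k => s.take k = s.drop (s.length - k)) (s.length - 1)
  have : 0 < s.length := List.length_pos_of_ne_nil h
  unfold pb
  omega

theorem pb_take_lt {α : Type} [DecidableEq α] (s : List α) (k : Nat) (hk : 0 < k) :
    pb (s.take k) < k := by
  have h := Nat.findGreatest_le (P := fun j => (s.take k).take j = (s.take k).drop ((s.take k).length - j)) ((s.take k).length - 1)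
  have h2 : (s.take k).length ≤ k := by simp [List.length_take]
  unfold pb
  omega

def chainFind {α : Type} [DecidableEq α] (s : List α) (a : α) (k : Nat) : Nat :=
  if h : 0 < k then
    if s[k]? = some a then k else chainFind s a (pb (s.take k))
  else 0
termination_by k
decreasing_by exact pb_take_lt s k h

theorem chainFind_le {α : Type} [DecidableEq α] (s : List α) (a : α) (k : Nat) :
    chainFind s a k ≤ k := by
  induction k using Nat.strong_induction_on with
  | _ k ih =>
    rw [chainFind]
    split_ifs with h1 h2
    · exact le_refl k
    · exact le_trans (ih _ (pb_take_lt s k h1)) (le_of_lt (pb_take_lt s k h1))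
    · omega

theorem chainFind_bord {α : Type} [DecidableEq α] (s : List α) (a : α) (k : Nat)
    (hb : bordB s k) : bordB s (chainFind s a k) := by
  induction k using Nat.strong_induction_on with
  | _ k ih =>
    rw [chainFind]
    split_ifs with h1 h2
    · exact hb
    · exact ih _ (pb_take_lt s k h1) (bord_up s k _ hb (pb_bord _))
    · exact bordB_zero s

theorem chainFind_match {α : Type} [DecidableEq α] (s : List α) (a : α) (k : Nat) :
    chainFind s a k = 0 ∨ s[chainFind s a k]? = some a := by
  induction k using Nat.strong_induction_on with
  | _ k ih =>
    rw [chainFind]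
    split_ifs with h1 h2
    · exact Or.inr h2
    · exact ih _ (pb_take_lt s k h1)
    · exact Or.inl rfl

theorem chainFind_max {α : Type} [DecidableEq α] (s : List α) (a : α) (k j : Nat)
    (hb : bordB s k) (hj : bordB s j) (hjk : j ≤ k) (hm : s[j]? = some a) :
    j ≤ chainFind s a k := by
  induction k using Nat.strong_induction_on with
  | _ k ih =>
    rw [chainFind]
    split_ifs with h1 h2
    · exact hjk
    · -- no match at k, so j < k and j descends into the border chain
      have hjne : j ≠ k := by
        intro he
        rw [he] at hm
        exact h2 hm
      have hjlt : j < k := lt_of_le_of_ne hjk hjne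
      have hkb : bordB (s.take k) j := bord_down s k j hb hj hjk
      have hjle : j ≤ pb (s.take k) := by
        apply pb_ge _ _ hkb
        rw [List.length_take]
        have := hb.1
        omega
      exact ih _ (pb_take_lt s k h1) (bord_up s k _ hb (pb_bord _)) hjle
    · -- k = 0
      omega

theorem pb_snoc {α : Type} [DecidableEq α] (s : List α) (a : α) (hs : s ≠ []) :
    pb (s ++ [a])
      = (if s[chainFind s a (pb s)]? = some a then chainFind s a (pb s) + 1
         else chainFind s a (pb s)) := by
  have hb : bordB s (pb s) := pb_bord s
  have hblt : pb s < s.length := pb_lt s hs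
  have hrle : chainFind s a (pb s) ≤ pb s := chainFind_le s a (pb s)
  have hrb : bordB s (chainFind s a (pb s)) := chainFind_bord s a (pb s) hb
  set r := chainFind s a (pb s) with hr
  split_ifs with hm
  · -- match: pb (s ++ [a]) = r + 1
    have hbr : bordB (s ++ [a]) (r + 1) :=
      (bord_snoc s a r (by omega)).mpr ⟨hrb, hm⟩
    have hge : r + 1 ≤ pb (s ++ [a]) := by
      apply pb_ge _ _ hbr
      simp
      omega
    have hle : pb (s ++ [a]) ≤ r + 1 := by
      have hp : bordB (s ++ [a]) (pb (s ++ [a])) := pb_bord _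
      have hplt : pb (s ++ [a]) < s.length + 1 := by
        have := pb_lt (s ++ [a]) (by simp)
        simpa using this
      rcases Nat.eq_zero_or_pos (pb (s ++ [a])) with h0 | hpos
      · omega
      · obtain ⟨p', hp'⟩ : ∃ p', pb (s ++ [a]) = p' + 1 := ⟨pb (s ++ [a]) - 1, by omega⟩
        rw [hp'] at hp hplt
        obtain ⟨hpb, hpm⟩ := (bord_snoc s a p' (by omega)).mp hp
        have : p' ≤ r := chainFind_max s a (pb s) p' hb hpb (pb_ge s p' hpb (by omega)) hpm
        omega
    omega
  · -- no match: r = 0 and s[0]? ≠ some a, so pb (s ++ [a]) = 0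
    have hr0 : r = 0 := by
      rcases chainFind_match s a (pb s) with h | h
      · exact h
      · exact absurd h hm
    rw [hr0]
    by_contra hne
    have hpos : 0 < pb (s ++ [a]) := Nat.pos_of_ne_zero hne
    obtain ⟨p', hp'⟩ : ∃ p', pb (s ++ [a]) = p' + 1 := ⟨pb (s ++ [a]) - 1, by omega⟩
    have hp : bordB (s ++ [a]) (pb (s ++ [a])) := pb_bord _
    have hplt : pb (s ++ [a]) < s.length + 1 := by
      have := pb_lt (s ++ [a]) (by simp)
      simpa using this
    rw [hp'] at hp hplt
    obtain ⟨hpb, hpm⟩ := (bord_snoc s a p' (by omega)).mp hp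
    have hple : p' ≤ r := chainFind_max s a (pb s) p' hb hpb (pb_ge s p' hpb (by omega)) hpm
    rw [hr0] at hple
    interval_cases p'
    rw [hr0] at hm
    exact hm hpm

theorem getElem?_take_lt {α : Type} (l : List α) (n i : Nat) (h : i < n) : (l.take n)[i]? = l[i]? := by
  rw [List.getElem?_take]
  simp [h]

theorem kmpWhile_eq (u : List (Option (String × Int))) (f : List Int) (iN : Nat)
    (hi : iN < u.length)
    (hf : ∀ j : Nat, j < iN → f.getD j 0 = (pb (u.take j) : Int)) :
    ∀ (fuel kN : Nat), kN ≤ fuel → kN < iN → bordB (u.take iN) kN →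
      kmpWhile u f (iN : Int) (kN : Int) fuel = (chainFind (u.take iN) u[iN] kN : Int) := by
  have hgi : PySem.List.pyGet? u (iN : Int) = some u[iN] := by
    rw [PySem.List.pyGet?_natCast, List.getElem?_eq_getElem hi]
  intro fuel
  induction fuel with
  | zero =>
    intro kN h0 hlt hb
    have hz : kN = 0 := by omega
    subst hz
    rw [kmpWhile, chainFind]
    simp
  | succ fuel ih =>
    intro kN hle hlt hb
    have hgk : PySem.List.pyGet? u (kN : Int) = (u.take iN)[kN]? := by
      rw [PySem.List.pyGet?_natCast, getElem?_take_lt u iN kN hlt]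
    rcases Nat.eq_zero_or_pos kN with hz | hpos
    · subst hz
      rw [kmpWhile, chainFind]
      simp
    · rw [kmpWhile, chainFind, dif_pos hpos]
      by_cases hm : (u.take iN)[kN]? = some u[iN]
      · rw [if_pos hm, if_neg (fun hc => hc.2 (by rw [hgi, hgk, hm]))]
      · rw [if_neg hm, if_pos ⟨by exact_mod_cast hpos, by rw [hgi, hgk]; exact fun h => hm h.symm⟩]
        have hfk : f.getD ((kN : Int)).toNat 0 = (pb (u.take kN) : Int) := by
          rw [Int.toNat_natCast]
          exact hf kN hlt
        have htt : u.take kN = (u.take iN).take kN := by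
          rw [List.take_take, min_eq_left (le_of_lt hlt)]
        have hlt' : pb ((u.take iN).take kN) < kN := pb_take_lt _ _ hpos
        rw [hfk, htt]
        exact ih (pb ((u.take iN).take kN)) (by omega) (by omega)
          (bord_up _ kN _ hb (pb_bord _))

theorem pb_small {α : Type} [DecidableEq α] (s : List α) (h : s.length ≤ 1) : pb s = 0 := by
  have : s.length - 1 = 0 := by omega
  unfold pb
  rw [this, Nat.findGreatest_zero]

def kmpState (u : List (Option (String × Int))) (t : Nat) : List Int × Int :=
  (PySem.List.pyRange 1 (t : Int) 1).foldl
    (fun st i =>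
      let k := kmpWhile u st.1 i st.2 st.2.toNat
      let k := if PySem.List.pyGet? u i = PySem.List.pyGet? u k then k + 1 else k
      (st.1.set (i + 1).toNat k, k))
    (List.replicate (u.length + 1) 0, 0)

theorem getD_set_self (l : List Int) (i : Nat) (v : Int) (h : i < l.length) :
    (l.set i v).getD i 0 = v := by
  rw [List.getD, List.getElem?_set_self h]
  rfl

theorem getD_set_ne (l : List Int) (i j : Nat) (v : Int) (h : i ≠ j) :
    (l.set i v).getD j 0 = l.getD j 0 := by
  rw [List.getD, List.getElem?_set_ne h, List.getD]

theorem kmpInv (u : List (Option (String × Int))) : ∀ t : Nat, 1 ≤ t → t ≤ u.length →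
    (kmpState u t).1.length = u.length + 1 ∧
    (∀ j : Nat, j ≤ t → (kmpState u t).1.getD j 0 = (pb (u.take j) : Int)) ∧
    (kmpState u t).2 = (pb (u.take t) : Int) := by
  intro t ht
  induction t, ht using Nat.le_induction with
  | base =>
    intro _
    have h1 : kmpState u 1 = (List.replicate (u.length + 1) 0, 0) := by
      unfold kmpState
      rw [show ((1:Nat):Int) = 1 from rfl, PySem.List.pyRange_one_eq_nil (le_refl 1)]
      rfl
    rw [h1]
    refine ⟨by simp, fun j hj => ?_, ?_⟩
    · have hpb : pb (u.take j) = 0 := pb_small _ (by simp [List.length_take]; omega)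
      rw [hpb]
      simp only [List.getD]
      have : j < (List.replicate (u.length + 1) (0:Int)).length := by simp; omega
      simp [List.getElem?_eq_getElem this]
    · have hpb : pb (u.take 1) = 0 := pb_small _ (by simp [List.length_take])
      rw [hpb]
      rfl
  | succ t ht ih =>
    intro hle
    have ih' := ih (by omega)
    obtain ⟨hL, hG, hK⟩ := ih'
    -- unfold one step of the fold
    have hstep : kmpState u (t + 1)
        = (let st := kmpState u t
           let k := kmpWhile u st.1 (t : Int) st.2 st.2.toNat
           let k := if PySem.List.pyGet? u (t : Int) = PySem.List.pyGet? u k then k + 1 else k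
           (st.1.set ((t : Int) + 1).toNat k, k)) := by
      unfold kmpState
      rw [show (((t+1:Nat)):Int) = (t:Int) + 1 by push_cast; ring,
          PySem.List.pyRange_one_succ_right (by exact_mod_cast ht), List.foldl_append]
      rfl
    have htlt : t < u.length := by omega
    have hs_len : (u.take t).length = t := by simp [List.length_take]; omega
    have hsne : u.take t ≠ [] := by
      intro h
      have := congrArg List.length h
      rw [hs_len] at this
      simp at this
      omega
    have hpbs : pb (u.take t) < t := by
      have := pb_lt (u.take t) hsne
      omega
    have hwhile : kmpWhile u (kmpState u t).1 (t : Int) (kmpState u t).2 (kmpState u t).2.toNat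
        = (chainFind (u.take t) u[t] (pb (u.take t)) : Int) := by
      rw [hK, Int.toNat_natCast]
      exact kmpWhile_eq u (kmpState u t).1 t htlt (fun j hj => hG j (by omega))
        (pb (u.take t)) (pb (u.take t)) (le_refl _) hpbs (pb_bord _)
    set r := chainFind (u.take t) u[t] (pb (u.take t)) with hrdef
    have hrlt : r < t := lt_of_le_of_lt (chainFind_le _ _ _) hpbs
    have hmt : (PySem.List.pyGet? u (t : Int) = PySem.List.pyGet? u (r : Int))
        ↔ ((u.take t)[r]? = some u[t]) := by
      rw [PySem.List.pyGet?_natCast, PySem.List.pyGet?_natCast, List.getElem?_eq_getElem htlt,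
          getElem?_take_lt u t r hrlt]
      constructor
      · intro h; exact h.symm
      · intro h; exact h.symm
    have htake : u.take (t + 1) = u.take t ++ [u[t]] := by
      rw [← List.take_concat_get' u t htlt]
    have hknew : (if PySem.List.pyGet? u (t : Int) = PySem.List.pyGet? u ((r : Nat) : Int)
          then ((r : Nat) : Int) + 1 else ((r : Nat) : Int)) = (pb (u.take (t + 1)) : Int) := by
      rw [htake, pb_snoc (u.take t) u[t] hsne, ← hrdef]
      by_cases hm : (u.take t)[r]? = some u[t]
      · rw [if_pos (hmt.mpr hm), if_pos hm]
        push_cast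
        ring
      · rw [if_neg (fun h => hm (hmt.mp h)), if_neg hm]
    refine ⟨?_, ?_, ?_⟩
    · rw [hstep]
      simp only []
      rw [List.length_set]
      exact hL
    · intro j hj
      have hidx : (((t : Int)) + 1).toNat = t + 1 := by omega
      rw [hstep]
      simp only [hwhile, hknew, hidx]
      by_cases hjt : j = t + 1
      · subst hjt
        exact getD_set_self _ _ _ (by rw [hL]; omega)
      · rw [getD_set_ne _ _ _ _ (fun h => hjt h.symm)]
        exact hG j (by omega)
    · rw [hstep]
      simp only [hwhile, hknew]

theorem palChain_mem (u : List (Option (String × Int))) (f : List Int)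
    (hf : ∀ j : Nat, j ≤ u.length → f.getD j 0 = (pb (u.take j) : Int)) :
    ∀ (fuel kN : Nat) (s0 : PySem.Set Int), kN < fuel → kN ≤ u.length → bordB u kN →
    ∀ x : Int, (x ∈ palChain f (kN : Int) fuel s0 ↔
      x ∈ s0 ∨ ∃ j : Nat, 0 < j ∧ j ≤ kN ∧ bordB u j ∧ x = (j : Int)) := by
  intro fuel
  induction fuel with
  | zero => intro kN s0 h; omega
  | succ fuel ih =>
    intro kN s0 hfuel hkle hb x
    rcases Nat.eq_zero_or_pos kN with hz | hpos
    · subst hz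
      rw [palChain]
      rw [if_neg (by omega)]
      constructor
      · exact Or.inl
      · rintro (h | ⟨j, hj1, hj2, _, _⟩)
        · exact h
        · omega
    · rw [palChain, if_pos (by exact_mod_cast hpos)]
      have hfk : f.getD ((kN : Int)).toNat 0 = (pb (u.take kN) : Int) := by
        rw [Int.toNat_natCast]; exact hf kN hkle
      have hlen : (u.take kN).length = kN := by simp [List.length_take]; omega
      have hne : u.take kN ≠ [] := by
        intro h
        have := congrArg List.length h
        rw [hlen] at this
        simp at this
        omega
      have hplt : pb (u.take kN) < kN := by have := pb_lt _ hne; omega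
      have hbp : bordB u (pb (u.take kN)) := bord_up u kN _ hb (pb_bord _)
      rw [hfk, ih (pb (u.take kN)) (PySem.Set.add s0 (kN : Int)) (by omega) (by omega) hbp x,
          PySem.Set.mem_add]
      constructor
      · rintro ((h | h) | ⟨j, hj1, hj2, hj3, hj4⟩)
        · exact Or.inl h
        · exact Or.inr ⟨kN, hpos, le_refl _, hb, h⟩
        · exact Or.inr ⟨j, hj1, by omega, hj3, hj4⟩
      · rintro (h | ⟨j, hj1, hj2, hj3, hj4⟩)
        · exact Or.inl (Or.inl h)
        · by_cases hjk : j = kN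
          · exact Or.inl (Or.inr (by rw [hj4, hjk]))
          · refine Or.inr ⟨j, hj1, ?_, hj3, hj4⟩
            have hjlt : j < kN := by omega
            have hbd : bordB (u.take kN) j := bord_down u kN j hb hj3 (by omega)
            have := pb_ge (u.take kN) j hbd (by omega)
            omega

theorem bord_sep (mid : List (String × Int)) (j : Nat) (hj : 0 < j)
    (hlt : j < (mid.map some ++ [none] ++ mid.reverse.map some).length) :
    (bordB (mid.map some ++ [none] ++ mid.reverse.map some) j ↔
      j ≤ mid.length ∧ mid.take j = (mid.take j).reverse) := by
  set m := mid.length with hm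
  have hulen : (mid.map some ++ [none] ++ mid.reverse.map some).length = 2 * m + 1 := by
    simp [hm]; omega
  by_cases hjm : j ≤ m
  · -- the prefix lies in mid, the suffix in rev mid
    have htke : (mid.map some ++ [none] ++ mid.reverse.map some).take j
        = (mid.take j).map some := by
      rw [List.take_append_of_le_length (by simp; omega),
          List.take_append_of_le_length (by simp; omega), List.map_take]
    have hdrp : (mid.map some ++ [none] ++ mid.reverse.map some).drop
          ((mid.map some ++ [none] ++ mid.reverse.map some).length - j)
        = ((mid.take j).reverse).map some := by
      rw [hulen]
      have h1 : 2 * m + 1 - j = (mid.map some ++ [none]).length + (m - j) := by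
        simp; omega
      rw [List.append_assoc, ← List.append_assoc, h1, List.drop_append]
      have hnil : (mid.map some ++ [none]).drop ((mid.map some ++ [none]).length + (m - j)) = [] :=
        List.drop_eq_nil_iff.mpr (Nat.le_add_right _ _)
      have hsub : (mid.map some ++ [none]).length + (m - j) - (mid.map some ++ [none]).length
          = m - j := by omega
      rw [hnil, List.nil_append, hsub, ← List.map_drop, List.drop_reverse]
      congr 2
      rw [← hm]
      congr 1
      omega
    unfold bordB
    rw [htke, hdrp, hulen]
    constructor
    · rintro ⟨h1, h2⟩
      exact ⟨hjm, (List.map_injective_iff.mpr (Option.some_injective _)) h2⟩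
    · rintro ⟨h1, h2⟩
      exact ⟨by omega, by rw [← h2]⟩
  · -- j spans the sentinel: impossible
    constructor
    · rintro ⟨h1, h2⟩
      exfalso
      have hLm : ((mid.map some ++ [none] ++ mid.reverse.map some).take j)[m]?
          = some none := by
        rw [List.getElem?_take]
        rw [if_pos (by omega)]
        rw [List.getElem?_append_left (by simp; omega), List.getElem?_append_right (by simp [hm])]
        simp [hm]
      have hRm : ((mid.map some ++ [none] ++ mid.reverse.map some).drop
            ((mid.map some ++ [none] ++ mid.reverse.map some).length - j))[m]?
          = (mid.reverse.map some)[2 * m - j]? := by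
        rw [List.getElem?_drop, hulen]
        rw [List.getElem?_append_right (by simp; omega)]
        congr 1
        simp
        omega
      have hidx : 2 * m - j < m := by omega
      obtain ⟨y, hy⟩ : ∃ y, mid.reverse[2 * m - j]? = some y := by
        rw [List.getElem?_eq_getElem (by simp; omega)]
        exact ⟨_, rfl⟩
      rw [h2, hRm, List.getElem?_map, hy] at hLm
      simp at hLm
    · rintro ⟨h1, _⟩
      omega

theorem u_len (rest : List (String × Int)) :
    (rest.map some ++ [none] ++ rest.reverse.map some).length = 2 * rest.length + 1 := by
  simp; omega

theorem pal_mem_iff (rest : List (String × Int)) (x : Int) :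
    (x ∈ palChain (kmpFold (rest.map some ++ [none] ++ rest.reverse.map some)).1
        ((kmpFold (rest.map some ++ [none] ++ rest.reverse.map some)).1.getD
          (rest.map some ++ [none] ++ rest.reverse.map some).length 0)
        ((rest.map some ++ [none] ++ rest.reverse.map some).length + 1) PySem.Set.empty) ↔
    (∃ j : Nat, 0 < j ∧ j < (rest.map some ++ [none] ++ rest.reverse.map some).length ∧
      bordB (rest.map some ++ [none] ++ rest.reverse.map some) j ∧ x = (j : Int)) := by
  set u := rest.map some ++ [none] ++ rest.reverse.map some with hu
  have hlen : u.length = 2 * rest.length + 1 := u_len rest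
  have hune : u ≠ [] := by
    intro h
    rw [h] at hlen
    simp at hlen
  obtain ⟨hL, hG, hK⟩ := kmpInv u u.length (by omega) (le_refl _)
  have hfold : (kmpFold u).1 = (kmpState u u.length).1 := rfl
  have hstart : (kmpFold u).1.getD u.length 0 = ((pb u : Nat) : Int) := by
    rw [hfold, hG u.length (le_refl _), List.take_length]
  have hpblt : pb u < u.length := pb_lt u hune
  rw [hstart, hfold,
    palChain_mem u (kmpState u u.length).1 hG (u.length + 1) (pb u) PySem.Set.empty
      (by omega) (by omega) (pb_bord u) x]
  constructor
  · rintro (h | ⟨j, hj1, hj2, hj3, hj4⟩)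
    · simp [PySem.Set.empty] at h
    · exact ⟨j, hj1, by omega, hj3, hj4⟩
  · rintro ⟨j, hj1, hj2, hj3, hj4⟩
    exact Or.inr ⟨j, hj1, pb_ge u j hj3 hj2, hj3, hj4⟩

theorem B_cond_iff (char0 : String) (count0 : Int) (rest : List (String × Int)) (index : Int)
    (h1 : 1 ≤ index) (h2 : index < (((char0, count0) :: rest).length : Int)) :
    ((index = 1 ∨ (index - 1) ∈ palChain (kmpFold (rest.map some ++ [none] ++ rest.reverse.map some)).1
        ((kmpFold (rest.map some ++ [none] ++ rest.reverse.map some)).1.getD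
          (rest.map some ++ [none] ++ rest.reverse.map some).length 0)
        ((rest.map some ++ [none] ++ rest.reverse.map some).length + 1) PySem.Set.empty) ↔
      (PySem.List.slice ((char0, count0) :: rest) (some 1) (some index)
        = (PySem.List.slice ((char0, count0) :: rest) (some 1) (some index)).reverse)) := by
  have hlen : (rest.map some ++ [none] ++ rest.reverse.map some).length = 2 * rest.length + 1 :=
    u_len rest
  have hj : index = ((index.toNat : Nat) : Int) := by omega
  set jN := index.toNat with hjN
  have hj1 : 1 ≤ jN := by omega
  have hjm : jN < rest.length + 1 := by
    simp at h2
    omega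
  have hslice : PySem.List.slice ((char0, count0) :: rest) (some 1) (some index)
      = rest.take (jN - 1) := by
    rw [hj]
    have h := PySem.List.slice_natCast ((char0, count0) :: rest) 1 jN
    rw [show (((1:Nat)):Int) = 1 from rfl] at h
    rw [h]
    simp
  rw [hslice, pal_mem_iff]
  constructor
  · rintro (h | ⟨jb, hb1, hb2, hb3, hb4⟩)
    · have : jN = 1 := by omega
      rw [this]
      simp
    · have hjb : jb = jN - 1 := by omega
      subst hjb
      exact ((bord_sep rest (jN - 1) hb1 hb2).mp hb3).2
  · intro hpal
    by_cases hone : jN = 1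
    · left
      omega
    · right
      refine ⟨jN - 1, by omega, by rw [hlen]; omega, ?_, by omega⟩
      exact (bord_sep rest (jN - 1) (by omega) (by rw [hlen]; omega)).mpr ⟨by omega, hpal⟩


def emit (cw : List (String × Int)) (char0 : String) (count0 : Int) (i : Int) :
    List (List (String × Int)) :=
  match PySem.List.pyGet? cw i with
  | none => []
  | some (char, count) =>
    if char = char0 ∧ count0 ≤ count then
      if PySem.List.slice cw (some 1) (some i) = (PySem.List.slice cw (some 1) (some i)).reverse then
        if count = count0 then [PySem.List.slice cw (some (i + 1)) none]
        else [(char, count - count0) :: PySem.List.slice cw (some (i + 1)) none]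
      else []
    else []

def emitB (cw : List (String × Int)) (char0 : String) (count0 : Int) (pal : PySem.Set Int)
    (index : Int) : List (List (String × Int)) :=
  match PySem.List.pyGet? cw index with
  | none => []
  | some (char, count) =>
    if char = char0 ∧ count0 ≤ count ∧ (index = 1 ∨ (index - 1) ∈ pal) then
      if count = count0 then [PySem.List.slice cw (some (index + 1)) none]
      else [(char, count - count0) :: PySem.List.slice cw (some (index + 1)) none]
    else []

theorem foldl_eq_flatMap {α β : Type} (f : List β → α → List β) (g : α → List β)
    (h : ∀ acc x, f acc x = acc ++ g x) (l : List α) : l.foldl f [] = l.flatMap g := by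
  rw [PySem.List.foldl_congr_mem l f (fun acc x => acc ++ g x) [] (fun acc x _ => h acc x),
      PySem.List.foldl_append_eq_flatMap, List.nil_append]


-- ---- A-side machinery ----

-- a list of length at most one is its own reverse
theorem rev_short {α : Type} (m : List α) (h : m.length ≤ 1) : m.reverse = m := by
  match m with
  | [] => rfl
  | [a] => rfl
  | a :: b :: t => simp at h

-- a :: (m ++ [b]) is a palindrome iff a = b and m is one
theorem pal_cons_concat {α : Type} (a b : α) (m : List α) :
    (a :: (m ++ [b]) = (a :: (m ++ [b])).reverse) ↔ (a = b ∧ m = m.reverse) := by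
  simp [List.reverse_append]
  exact fun h _ => h.symm

-- segment decomposition: cw[l : r+1] = cw[l] :: (cw[l+1 : r] ++ [cw[r]]) for l < r < len
theorem seg_decomp {α : Type} (cw : List α) (l r : Nat) (hlr : l < r) (hr : r < cw.length) :
    (cw.drop l).take (r + 1 - l)
      = cw[l] :: ((cw.drop (l + 1)).take (r - 1 - l) ++ [cw[r]]) := by
  have h1 : cw.drop l = cw[l] :: cw.drop (l + 1) := List.drop_eq_getElem_cons (by omega)
  rw [h1]
  have h2 : r + 1 - l = (r - l - 1) + 1 + 1 := by omega
  rw [h2, List.take_succ_cons]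
  congr 1
  rw [List.take_add_one]
  have hx : l + 1 + (r - l - 1) = r := by omega
  have h3 : (cw.drop (l + 1))[r - l - 1]? = some cw[r] := by
    rw [List.getElem?_drop, hx, List.getElem?_eq_getElem hr]
  rw [h3]
  congr 2
  omega

-- the two-pointer loop decides palindromicity of the segment cw[l : r+1]
theorem palLoop_eq (cw : List (String × Int)) :
    ∀ (d l r : Nat), r - l = d → r < cw.length →
    isPalindromeLoop cw (l : Int) (r : Int)
      = decide ((cw.drop l).take (r + 1 - l) = ((cw.drop l).take (r + 1 - l)).reverse) := by
  intro d
  induction d using Nat.strong_induction_on with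
  | _ d ih =>
    intro l r hd hr
    by_cases hlr : l < r
    · rw [isPalindromeLoop]
      rw [if_pos (by exact_mod_cast hlr)]
      have hl : PySem.List.pyGet? cw (l : Int) = some cw[l] := by
        rw [PySem.List.pyGet?_natCast, List.getElem?_eq_getElem (by omega)]
      have hrg : PySem.List.pyGet? cw (r : Int) = some cw[r] := by
        rw [PySem.List.pyGet?_natCast, List.getElem?_eq_getElem hr]
      rw [hl, hrg, seg_decomp cw l r hlr hr]
      by_cases heq : cw[l] = cw[r]
      · rw [if_neg (by simp [heq])]
        have e1 : (l : Int) + 1 = ((l + 1 : Nat) : Int) := by push_cast; ring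
        have e2 : (r : Int) - 1 = ((r - 1 : Nat) : Int) := by omega
        rw [e1, e2, ih (r - 1 - (l + 1)) (by omega) (l + 1) (r - 1) rfl (by omega)]
        have e3 : r - 1 + 1 - (l + 1) = r - 1 - l := by omega
        rw [e3, decide_eq_decide, pal_cons_concat]
        simp [heq]
      · rw [if_pos (by simp [heq])]
        simp [heq]
    · rw [isPalindromeLoop, if_neg (by exact_mod_cast hlr)]
      have hlen : ((cw.drop l).take (r + 1 - l)).length ≤ 1 := by
        simp [List.length_take]
        omega
      rw [rev_short _ hlen]
      simp

-- per-iteration emission of A's loop (proof-only helper)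
def emitA (cw : List (String × Int)) (p : Int × (String × Int)) : List (List (String × Int)) :=
  match PySem.List.pyGet? cw 0 with
  | none => []
  | some (lastChar, lastCount) =>
    if p.2.1 ≠ lastChar ∨ p.2.2 < lastCount then []
    else if p.1 = 0 then
      [PySem.List.slice cw (some 1) none]
        ++ (PySem.List.pyRange 1 p.2.2 1).map (fun c => (p.2.1, c) :: PySem.List.slice cw (some 1) none)
    else if isPalindrome cw 1 p.1 then
      if p.2.2 = lastCount then [PySem.List.slice cw (some (p.1 + 1)) none]
      else [(p.2.1, p.2.2 - lastCount) :: PySem.List.slice cw (some (p.1 + 1)) none]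
    else []

theorem A_foldl (cw : List (String × Int)) :
    getSufixAfterPalindromes cw = (PySem.List.enumerate cw 0).reverse.flatMap (emitA cw) := by
  unfold getSufixAfterPalindromes
  apply foldl_eq_flatMap
  intro acc p
  obtain ⟨i, ch, ct⟩ := p
  simp only [emitA]
  rcases hg : PySem.List.pyGet? cw 0 with _ | ⟨lc, lk⟩
  · simp
  · simp only []
    split_ifs with h1 h2 h3 h4
    · simp
    · rw [PySem.List.foldl_append_singleton_eq_map]
      simp [List.append_assoc]
    · simp
    · simp
    · simp

theorem A_shape (char0 : String) (count0 : Int) (rest : List (String × Int)) :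
    getSufixAfterPalindromes ((char0, count0) :: rest)
      = ((PySem.List.pyRange 1 (((char0, count0) :: rest).length : Int) 1).reverse.flatMap
          (emit ((char0, count0) :: rest) char0 count0))
        ++ [PySem.List.slice ((char0, count0) :: rest) (some 1) none]
        ++ (PySem.List.pyRange 1 count0 1).map
            (fun c => (char0, c) :: PySem.List.slice ((char0, count0) :: rest) (some 1) none) := by
  have hn : (0 : Int) < (((char0, count0) :: rest).length : Int) := by
    simp
  rw [A_foldl, PySem.List.enumerate_eq_map_pyRange _ (char0, count0)]
  rw [← List.map_reverse, List.flatMap_map]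
  have hlen : PySem.List.len ((char0, count0) :: rest) = (((char0, count0) :: rest).length : Int) := by
    simp [PySem.List.len]
  rw [hlen, PySem.List.pyRange_one_cons hn, List.reverse_cons, List.flatMap_append]
  have h0 : emitA ((char0, count0) :: rest) (0, PySem.List.pyGetD ((char0, count0) :: rest) 0 (char0, count0))
      = [PySem.List.slice ((char0, count0) :: rest) (some 1) none]
        ++ (PySem.List.pyRange 1 count0 1).map
            (fun c => (char0, c) :: PySem.List.slice ((char0, count0) :: rest) (some 1) none) := by
    have hd : PySem.List.pyGetD ((char0, count0) :: rest) 0 (char0, count0) = (char0, count0) := by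
      rw [PySem.List.pyGetD_eq_getElem _ _ (by omega) (by simp)]
      rfl
    rw [hd]
    simp only [emitA, PySem.List.pyGet?_zero_cons]
    simp
  simp only [List.flatMap_cons, List.flatMap_nil, List.append_nil] at h0 ⊢
  rw [h0, ← List.append_assoc]
  have e01 : (0 : Int) + 1 = 1 := rfl
  rw [e01]
  congr 1
  congr 1
  apply List.flatMap_congr
  intro i hi
  rw [List.mem_reverse, PySem.List.mem_pyRange_one] at hi
  obtain ⟨hi1, hi2⟩ := hi
  have hj : i = ((i.toNat : Nat) : Int) := by omega
  set j := i.toNat with hjdef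
  have hjlen : j < ((char0, count0) :: rest).length := by omega
  have hj1 : 1 ≤ j := by omega
  rw [hj]
  rw [PySem.List.pyGetD_eq_getElem _ _ (by omega) (by omega)]
  rcases hpr : ((char0, count0) :: rest)[(((j : Int)).toNat)] with ⟨ch, ct⟩
  have hget : PySem.List.pyGet? ((char0, count0) :: rest) ((j : Nat) : Int) = some (ch, ct) := by
    rw [PySem.List.pyGet?_natCast, List.getElem?_eq_getElem hjlen]
    simp only [Int.toNat_natCast] at hpr
    rw [hpr]
  simp only [emitA, emit, hget, PySem.List.pyGet?_zero_cons]
  by_cases hcond : ch = char0 ∧ count0 ≤ ct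
  · obtain ⟨hc1, hc2⟩ := hcond
    rw [if_neg (by simp [hc1]; omega), if_neg (show ¬((j : Int) = 0) by simp; omega),
        if_pos (c := ch = char0 ∧ count0 ≤ ct) ⟨hc1, hc2⟩]
    have e2 : ((j : Int)) - 1 = ((j - 1 : Nat) : Int) := by omega
    have e3 : j - 1 + 1 - 1 = j - 1 := by omega
    have e4 : PySem.List.slice ((char0, count0) :: rest) (some 1) (some ((j : Nat) : Int))
        = (((char0, count0) :: rest).drop 1).take (j - 1) := by
      exact_mod_cast PySem.List.slice_natCast ((char0, count0) :: rest) 1 j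
    have hP := palLoop_eq ((char0, count0) :: rest) (j - 1 - 1) 1 (j - 1) rfl (by omega)
    norm_num at hP
    simp only [isPalindrome, e2, hP, e4]
    simp
  · rw [if_pos (by rcases not_and_or.mp hcond with h | h
                   · exact Or.inl h
                   · exact Or.inr (by omega)),
        if_neg hcond]


theorem B_shape (char0 : String) (count0 : Int) (rest : List (String × Int)) :
    getSufixAfterPalindromes_alt ((char0, count0) :: rest)
      = ((PySem.List.pyRange 1 (((char0, count0) :: rest).length : Int) 1).reverse.flatMap
          (emit ((char0, count0) :: rest) char0 count0))
        ++ [PySem.List.slice ((char0, count0) :: rest) (some 1) none]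
        ++ (PySem.List.pyRange 1 count0 1).map
            (fun c => (char0, c) :: PySem.List.slice ((char0, count0) :: rest) (some 1) none) := by
  have htail : PySem.List.slice ((char0, count0) :: rest) (some 1) none = rest := by
    rw [PySem.List.slice_from_one]
    rfl
  simp only [getSufixAfterPalindromes_alt, htail]
  congr 1
  congr 1
  rw [foldl_eq_flatMap _
      (emitB ((char0, count0) :: rest) char0 count0
        (palChain (kmpFold (rest.map some ++ [none] ++ rest.reverse.map some)).1
          ((kmpFold (rest.map some ++ [none] ++ rest.reverse.map some)).1.getD
            (rest.map some ++ [none] ++ rest.reverse.map some).length 0)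
          ((rest.map some ++ [none] ++ rest.reverse.map some).length + 1) PySem.Set.empty))
      (by
        intro acc x
        simp only [emitB]
        rcases PySem.List.pyGet? ((char0, count0) :: rest) x with _ | ⟨ch, ct⟩
        · simp
        · simp only []
          split_ifs <;> simp)]
  have hrev : PySem.List.pyRange ((((char0, count0) :: rest).length : Int) - 1) 0 (-1)
      = (PySem.List.pyRange 1 (((char0, count0) :: rest).length : Int) 1).reverse := by
    rw [PySem.List.pyRange_neg_one_eq_reverse]
    norm_num
  rw [hrev]
  apply List.flatMap_congr
  intro i hi
  rw [List.mem_reverse, PySem.List.mem_pyRange_one] at hi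
  obtain ⟨hi1, hi2⟩ := hi
  have hcond := B_cond_iff char0 count0 rest i hi1 hi2
  simp only [emitB, emit]
  rcases PySem.List.pyGet? ((char0, count0) :: rest) i with _ | ⟨ch, ct⟩
  · rfl
  · simp only []
    by_cases hc : ch = char0 ∧ count0 ≤ ct
    · by_cases hp : PySem.List.slice ((char0, count0) :: rest) (some 1) (some i)
          = (PySem.List.slice ((char0, count0) :: rest) (some 1) (some i)).reverse
      · rw [if_pos ⟨hc.1, hc.2, hcond.mpr hp⟩, if_pos hc, if_pos hp]
      · rw [if_neg (fun h => hp (hcond.mp h.2.2)), if_pos hc, if_neg hp]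
    · rw [if_neg (fun h => hc ⟨h.1, h.2.1⟩), if_neg hc]

-- ===== VERDICT (by name: the statement is the Claim_ definition above) =====
theorem getSufixAfterPalindromes_spec : Claim_equal_getSufixAfterPalindromes := by
  intro cw _dom
  unfold Spec_getSufixAfterPalindromes
  match cw with
  | [] => rfl
  | (char0, count0) :: rest => rw [A_shape, B_shape]
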